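-- pv_equiv track=rewrite | github.com/cryndoc/polisade-orchestrator | scripts/pdlc_lint_skills.py | _ops027_line_index_for_offset
-- ===== SOURCE A (Python) =====
-- def _ops027_line_index_for_offset(lines, offset):
--     """Map a char offset in `"\\n".join(lines) + "\\n"` to a line index."""
--     line_starts = [0]
--     for ln in lines:
--         line_starts.append(line_starts[-1] + len(ln) + 1)  # +1 for \n
--     for i, off in enumerate(line_starts):
--         if off > offset:
--             return i - 1
--     return len(lines) - 1
-- ===== SOURCE B (Python) =====
-- def _ops027_line_index_for_offset(lines, offset):
--     """Map a char offset in `"\n".join(lines) + "\n"` to a line index."""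
--     total = 0
--     for i, ln in enumerate(lines):
--         if total > offset:
--             return i - 1
--         total += len(ln) + 1
--     return len(lines) - 1
-- ===== Notes on version B (the rewrite author's own statement) =====
-- stated objective: simpler
-- what changed: Single fused pass keeping a running start offset (with early exit) instead of materialising the full prefix-start array and then scanning it.
import Mathlib
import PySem

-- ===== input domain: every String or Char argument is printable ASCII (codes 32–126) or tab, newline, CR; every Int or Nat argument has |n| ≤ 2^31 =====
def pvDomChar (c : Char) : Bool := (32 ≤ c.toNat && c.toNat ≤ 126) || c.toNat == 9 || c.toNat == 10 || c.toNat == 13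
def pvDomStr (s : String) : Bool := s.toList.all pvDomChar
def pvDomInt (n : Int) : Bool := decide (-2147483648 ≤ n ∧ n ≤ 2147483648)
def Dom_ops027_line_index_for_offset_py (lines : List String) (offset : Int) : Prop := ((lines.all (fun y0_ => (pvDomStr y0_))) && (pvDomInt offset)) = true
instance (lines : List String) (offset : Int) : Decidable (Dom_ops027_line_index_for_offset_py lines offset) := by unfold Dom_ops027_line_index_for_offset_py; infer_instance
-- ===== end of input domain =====

-- B replaces A's build-prefix-array-then-scan with one fused pass over `lines`
-- keeping a running start offset (simpler: O(1) extra space, no index array).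

-- ===== PORT A =====
-- the `for i, off in enumerate(line_starts): if off > offset: return i - 1` scan
def pvScanA : List Int → Int → Int → Option Int
  | [], _, _ => none
  | off :: rest, i, offset => if off > offset then some (i - 1) else pvScanA rest (i + 1) offset

def ops027_line_index_for_offset_py (lines : List String) (offset : Int) : Int :=
  -- line_starts = [0]; for ln in lines: line_starts.append(line_starts[-1] + len(ln) + 1)
  -- (the pair's second component tracks line_starts[-1])
  let line_starts :=
    (lines.foldl (fun (acc : List Int × Int) ln =>
      let nxt := acc.2 + PySem.Str.len ln + 1
      (acc.1 ++ [nxt], nxt)) ([0], 0)).1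
  match pvScanA line_starts 0 offset with
  | some r => r
  | none => (lines.length : Int) - 1

-- ===== PORT B =====
def pvGoB : List String → Int → Int → Int → Int → Int
  | [], _, _, _, n => n - 1
  | ln :: rest, offset, i, total, n =>
      if total > offset then i - 1
      else pvGoB rest offset (i + 1) (total + PySem.Str.len ln + 1) n

def ops027_line_index_for_offset_py_alt (lines : List String) (offset : Int) : Int :=
  pvGoB lines offset 0 0 (lines.length : Int)

-- ===== PRECONDITION & SPEC =====
def Spec_ops027_line_index_for_offset_py (lines : List String) (offset : Int) (out : Int) : Prop := out = ops027_line_index_for_offset_py_alt lines offset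
instance (lines : List String) (offset : Int) (out : Int) : Decidable (Spec_ops027_line_index_for_offset_py lines offset out) := by unfold Spec_ops027_line_index_for_offset_py; infer_instance

-- ===== CLAIM (what is proved, stated in full; the proofs are below) =====
def Claim_equal_ops027_line_index_for_offset_py : Prop := ∀ (lines : List String) (offset : Int), Dom_ops027_line_index_for_offset_py lines offset → Spec_ops027_line_index_for_offset_py lines offset (ops027_line_index_for_offset_py lines offset)

-- ===== LEMMAS AND PROOFS =====

-- pure description of the tail of A's line_starts list (everything after the leading 0)
def pvStarts : List String → Int → List Int
  | [], _ => []
  | ln :: rest, last => (last + PySem.Str.len ln + 1) :: pvStarts rest (last + PySem.Str.len ln + 1)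

theorem pvFold_eq_starts (lines : List String) (acc : List Int) (last : Int) :
    (lines.foldl (fun (acc : List Int × Int) ln =>
      let nxt := acc.2 + PySem.Str.len ln + 1
      (acc.1 ++ [nxt], nxt)) (acc, last)).1 = acc ++ pvStarts lines last := by
  induction lines generalizing acc last with
  | nil => simp [pvStarts]
  | cons ln rest ih =>
      simp only [List.foldl_cons, pvStarts]
      rw [ih]
      simp

theorem pvScan_eq_go (lines : List String) (offset i total : Int) :
    (match pvScanA (total :: pvStarts lines total) i offset with
     | some r => r
     | none => (i + (lines.length : Int)) - 1) = pvGoB lines offset i total (i + (lines.length : Int)) := by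
  induction lines generalizing i total with
  | nil =>
      simp only [pvStarts, pvScanA, pvGoB, List.length_nil, Int.natCast_zero, Int.add_zero]
      split_ifs <;> simp
  | cons ln rest ih =>
      have hs : pvScanA (total :: pvStarts (ln :: rest) total) i offset
          = if total > offset then some (i - 1)
            else pvScanA (pvStarts (ln :: rest) total) (i + 1) offset := rfl
      rw [hs]
      by_cases h : total > offset
      · simp [h, pvGoB]
      · have hn : i + ((ln :: rest).length : Int) = (i + 1) + (rest.length : Int) := by
          simp [List.length_cons]; ring
        simp only [if_neg h, pvGoB, hn, pvStarts]
        exact ih (i + 1) (total + PySem.Str.len ln + 1)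

-- ===== VERDICT (by name: the statement is the Claim_ definition above) =====
theorem ops027_line_index_for_offset_py_spec : Claim_equal_ops027_line_index_for_offset_py := by
  intro lines offset _
  unfold Spec_ops027_line_index_for_offset_py ops027_line_index_for_offset_py ops027_line_index_for_offset_py_alt
  rw [pvFold_eq_starts]
  have h := pvScan_eq_go lines offset 0 0
  simp only [Int.zero_add] at h
  simpa using h
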